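-- pv_equiv track=rewrite | github.com/murtraja/python-aes-128-ecb | common.py | divide_bytes_into_grids
-- ===== SOURCE A (Python) =====
-- def divide_bytes_into_grids(input_bytes):
--     block_row_size = 4
--     block_total_size = block_row_size*block_row_size
--     '''
--     B B    B B    B B
--     B B    B B    B B are grids
--
--     B B
--     B B is a block
--
--     B B is the row in that block
--
--     '''
--     grids = []
--     for block in [input_bytes[i:i+block_total_size] for i in range(0,len(input_bytes),block_total_size)]:
--         rows = []
--         # now convert this block array to proper grid
--         for row in [block[i:i+block_row_size] for i in range(0, len(block), block_row_size)]:
--             rows.append(row)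
--         grids.append(rows)
--     return grids
-- ===== SOURCE B (Python) =====
-- def divide_bytes_into_grids(input_bytes):
--     rows = [input_bytes[i:i+4] for i in range(0, len(input_bytes), 4)]
--     return [rows[j:j+4] for j in range(0, len(rows), 4)]
-- ===== Notes on version B (the rewrite author's own statement) =====
-- stated objective: simpler
-- what changed: B builds one flat list of 4-byte rows in a single pass over the input and then regroups consecutive rows into grids of four, instead of slicing out 16-byte blocks and re-slicing each block into rows with an inner loop and accumulator appends.
import Mathlib
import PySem

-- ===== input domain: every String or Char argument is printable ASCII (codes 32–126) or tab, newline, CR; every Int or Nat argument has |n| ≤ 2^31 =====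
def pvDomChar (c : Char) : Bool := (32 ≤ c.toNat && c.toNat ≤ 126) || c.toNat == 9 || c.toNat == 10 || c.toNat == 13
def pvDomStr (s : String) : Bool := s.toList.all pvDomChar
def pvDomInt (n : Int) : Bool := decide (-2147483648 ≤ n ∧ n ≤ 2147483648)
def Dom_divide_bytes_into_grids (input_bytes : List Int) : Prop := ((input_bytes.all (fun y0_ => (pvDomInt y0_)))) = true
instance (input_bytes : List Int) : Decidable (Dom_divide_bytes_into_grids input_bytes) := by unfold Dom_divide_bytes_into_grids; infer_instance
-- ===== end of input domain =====

-- B replaces A's block-then-row nested slicing (with inner accumulator appends) by a flat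
-- one-pass list of 4-byte rows regrouped into grids of four rows (objective: simpler).

-- ===== PORT A =====
def divide_bytes_into_grids (input_bytes : List Int) : List (List (List Int)) :=
  let block_row_size : Int := 4
  let block_total_size : Int := block_row_size * block_row_size
  ((PySem.List.pyRange 0 (input_bytes.length : Int) block_total_size).map
      (fun i => PySem.List.slice input_bytes (some i) (some (i + block_total_size)))).foldl
    (fun grids block =>
      let rows :=
        ((PySem.List.pyRange 0 (block.length : Int) block_row_size).map
            (fun i => PySem.List.slice block (some i) (some (i + block_row_size)))).foldl
          (fun rows row => rows ++ [row]) []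
      grids ++ [rows]) []

-- ===== PORT B =====
def divide_bytes_into_grids_alt (input_bytes : List Int) : List (List (List Int)) :=
  let rows := (PySem.List.pyRange 0 (input_bytes.length : Int) 4).map
    (fun i => PySem.List.slice input_bytes (some i) (some (i + 4)))
  (PySem.List.pyRange 0 (rows.length : Int) 4).map
    (fun j => PySem.List.slice rows (some j) (some (j + 4)))

-- ===== PRECONDITION & SPEC =====
def Spec_divide_bytes_into_grids (input_bytes : List Int) (out : List (List (List Int))) : Prop := out = divide_bytes_into_grids_alt input_bytes
instance (input_bytes : List Int) (out : List (List (List Int))) : Decidable (Spec_divide_bytes_into_grids input_bytes out) := by unfold Spec_divide_bytes_into_grids; infer_instance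

-- ===== CLAIM (what is proved, stated in full; the proofs are below) =====
def Claim_equal_divide_bytes_into_grids : Prop := ∀ (input_bytes : List Int), Dom_divide_bytes_into_grids input_bytes → Spec_divide_bytes_into_grids input_bytes (divide_bytes_into_grids input_bytes)

-- ===== LEMMAS AND PROOFS =====

-- `chunk n xs` splits xs into consecutive pieces of size n+1 (the last may be shorter).
def chunk {α : Type} (n : Nat) (xs : List α) : List (List α) :=
  if h : xs = [] then [] else xs.take (n+1) :: chunk n (xs.drop (n+1))
termination_by xs.length
decreasing_by
  have : 0 < xs.length := List.length_pos_iff.mpr h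
  simp; omega

theorem chunk_nil {α : Type} (n : Nat) : chunk n ([] : List α) = [] := by
  rw [chunk]; simp

theorem chunk_cons {α : Type} (n : Nat) (xs : List α) (h : xs ≠ []) :
    chunk n xs = xs.take (n+1) :: chunk n (xs.drop (n+1)) := by
  rw [chunk]; simp [h]

theorem range_chunk {α : Type} (n : Nat) (xs : List α) :
    (List.range ((xs.length + n) / (n+1))).map
        (fun k => (xs.drop ((n+1)*k)).take (n+1)) = chunk n xs := by
  generalize hL : xs.length = L
  induction L using Nat.strong_induction_on generalizing xs with
  | _ L IH =>
    by_cases h : xs = []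
    · subst h
      simp at hL
      subst hL
      rw [Nat.div_eq_of_lt (show 0 + n < n+1 by omega), chunk_nil]
      simp
    · have hpos : 0 < xs.length := List.length_pos_iff.mpr h
      subst hL
      rw [chunk_cons n xs h]
      by_cases hle : xs.length ≤ n + 1
      · have hm : (xs.length + n) / (n+1) = 1 :=
          Nat.div_eq_of_lt_le (show 1*(n+1) ≤ xs.length + n by omega)
            (show xs.length + n < (1+1)*(n+1) by omega)
        have hdrop : xs.drop (n+1) = [] := by
          apply List.drop_eq_nil_of_le; omega
        rw [hm, hdrop, chunk_nil]
        simp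
      · have hm : (xs.length + n) / (n+1) = (xs.length - (n+1) + n) / (n+1) + 1 := by
          have : xs.length + n = (xs.length - (n+1) + n) + (n+1) := by omega
          rw [this, Nat.add_div_right _ (by omega)]
        rw [hm, List.range_succ_eq_map]
        simp only [List.map_cons, List.map_map]
        refine congrArg₂ List.cons (by simp) ?_
        rw [← IH (xs.length - (n+1)) (by omega) (xs.drop (n+1)) (by simp)]
        apply List.map_congr_left
        intro k _
        simp only [Function.comp]
        rw [List.drop_drop]
        congr 2
        simp [Nat.succ_eq_add_one]
        ring

theorem comp_chunk {α : Type} (n : Nat) (xs : List α) :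
    (PySem.List.pyRange 0 (xs.length : Int) ((n+1 : Nat) : Int)).map
        (fun i => PySem.List.slice xs (some i) (some (i + ((n+1 : Nat) : Int)))) = chunk n xs := by
  rw [PySem.List.pyRange_of_pos _ _ (by positivity), List.map_map]
  rw [← range_chunk n xs]
  have hM : (if (0:Int) < (xs.length:Int) then
        (((xs.length:Int) - 0 + ((n+1 : Nat) : Int) - 1) / ((n+1 : Nat) : Int)).toNat else 0)
      = (xs.length + n) / (n+1) := by
    split_ifs with hpos
    · have h1 : ((xs.length:Int) - 0 + ((n+1 : Nat) : Int) - 1) = ((xs.length + n : Nat) : Int) := by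
        push_cast; ring
      rw [h1, ← Int.natCast_div, Int.toNat_natCast]
    · have h0 : xs.length = 0 := by omega
      rw [h0, Nat.div_eq_of_lt (by omega)]
  rw [hM]
  apply List.map_congr_left
  intro k _
  have hc : (0 : Int) + ((n+1 : Nat) : Int) * (k : Int) = (((n+1)*k : Nat) : Int) := by
    push_cast; ring
  simp only [Function.comp, hc]
  exact PySem.List.slice_natCast_add xs ((n+1)*k) (n+1)

theorem foldl_snoc_map {α β : Type} (f : α → β) (l : List α) (init : List β) :
    l.foldl (fun a x => a ++ [f x]) init = init ++ l.map f := by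
  induction l generalizing init with
  | nil => simp
  | cons y ys ih => simp [ih]

theorem foldl_snoc_id {α : Type} (l : List α) (init : List α) :
    l.foldl (fun a x => a ++ [x]) init = init ++ l := by
  induction l generalizing init with
  | nil => simp
  | cons y ys ih => simp [ih]

theorem chunk_take {α : Type} (n m : Nat) (xs : List α) :
    (chunk n xs).take m = chunk n (xs.take ((n+1)*m)) := by
  induction m generalizing xs with
  | zero => simp [chunk_nil]
  | succ m ih =>
    by_cases h : xs = []
    · subst h; simp [chunk_nil]
    · rw [chunk_cons n xs h, List.take_succ_cons]
      have hne : xs.take ((n+1)*(m+1)) ≠ [] := by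
        simp [List.take_eq_nil_iff, h]
      rw [chunk_cons n _ hne]
      congr 1
      · rw [List.take_take]
        congr 1
        have : (n+1) ≤ (n+1)*(m+1) := Nat.le_mul_of_pos_right _ (by omega)
        omega
      · rw [ih, List.drop_take]
        congr 2
        have : (n+1)*(m+1) = (n+1)*m + (n+1) := by ring
        omega

theorem chunk_drop {α : Type} (n m : Nat) (xs : List α) :
    (chunk n xs).drop m = chunk n (xs.drop ((n+1)*m)) := by
  induction m generalizing xs with
  | zero => simp
  | succ m ih =>
    by_cases h : xs = []
    · subst h; simp [chunk_nil]
    · rw [chunk_cons n xs h, List.drop_succ_cons, ih, List.drop_drop]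
      congr 2
      ring

theorem map_chunk_eq {α : Type} (xs : List α) :
    (chunk 15 xs).map (chunk 3) = chunk 3 (chunk 3 xs) := by
  generalize hL : xs.length = L
  induction L using Nat.strong_induction_on generalizing xs with
  | _ L IH =>
    by_cases h : xs = []
    · subst h; simp [chunk_nil]
    · subst hL
      have hcne : chunk 3 xs ≠ [] := by rw [chunk_cons 3 xs h]; simp
      rw [chunk_cons 15 xs h, List.map_cons, chunk_cons 3 (chunk 3 xs) hcne,
        chunk_take, chunk_drop]
      norm_num
      exact IH (xs.drop 16).length (by have := List.length_pos_iff.mpr h; simp; omega) (xs.drop 16) rfl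

theorem portA_eq (xs : List Int) :
    divide_bytes_into_grids xs = (chunk 15 xs).map (chunk 3) := by
  simp only [divide_bytes_into_grids]
  rw [show ((4:Int)*4) = ((15+1 : Nat) : Int) by norm_num]
  rw [foldl_snoc_map]
  rw [comp_chunk 15 xs]
  simp only [List.nil_append]
  apply List.map_congr_left
  intro block _
  rw [show (4:Int) = ((3+1 : Nat) : Int) by norm_num]
  rw [foldl_snoc_id, comp_chunk 3 block]
  simp

theorem portB_eq (xs : List Int) :
    divide_bytes_into_grids_alt xs = chunk 3 (chunk 3 xs) := by
  simp only [divide_bytes_into_grids_alt]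
  rw [show (4:Int) = ((3+1 : Nat) : Int) by norm_num]
  rw [comp_chunk 3 xs, comp_chunk 3 (chunk 3 xs)]

-- ===== VERDICT (by name: the statement is the Claim_ definition above) =====
theorem divide_bytes_into_grids_spec : Claim_equal_divide_bytes_into_grids := by
  intro xs _
  unfold Spec_divide_bytes_into_grids
  rw [portA_eq, portB_eq, map_chunk_eq]
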